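-- pv_equiv track=rewrite | github.com/axellangenskiold/mini-crossword | crossword-engine/crossword_engine/grid.py | validate_black_cells
-- ===== SOURCE A (Python) =====
-- from typing import Iterable
--
-- def is_border_cell(row: int, col: int, width: int, height: int) -> bool:
--     return row == 0 or col == 0 or row == height - 1 or col == width - 1
--
-- def border_neighbors(cell: tuple[int, int], width: int, height: int) -> list[tuple[int, int]]:
--     row, col = cell
--     candidates = [
--         (row - 1, col),
--         (row + 1, col),
--         (row, col - 1),
--         (row, col + 1),
--     ]
--     neighbors = []
--     for r, c in candidates:
--         if 0 <= r < height and 0 <= c < width and is_border_cell(r, c, width, height):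
--             neighbors.append((r, c))
--     return neighbors
--
-- def corners(width: int, height: int) -> set[tuple[int, int]]:
--     return {
--         (0, 0),
--         (0, width - 1),
--         (height - 1, 0),
--         (height - 1, width - 1),
--     }
--
-- def valid_corners_for_cell(cell: tuple[int, int], width: int, height: int) -> set[tuple[int, int]]:
--     row, col = cell
--     valid: set[tuple[int, int]] = set()
--     if row == 0:
--         valid |= {(0, 0), (0, width - 1)}
--     if row == height - 1:
--         valid |= {(height - 1, 0), (height - 1, width - 1)}
--     if col == 0:
--         valid |= {(0, 0), (height - 1, 0)}
--     if col == width - 1: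
--         valid |= {(0, width - 1), (height - 1, width - 1)}
--     return valid
--
-- def validate_black_cells(
--     width: int, height: int, black_cells: Iterable[tuple[int, int]]
-- ) -> bool:
--     black_set = {tuple(cell) for cell in black_cells}
--     if len(black_set) > 4:
--         return False
--     for row, col in black_set:
--         if not is_border_cell(row, col, width, height):
--             return False
--
--     if not black_set:
--         return True
--
--     corners_set = corners(width, height)
--     visited: set[tuple[int, int]] = set()
--
--     for start in list(black_set):
--         if start in visited:
--             continue
--         stack = [start]
--         component: set[tuple[int, int]] = set()
--         while stack:
--             cell = stack.pop()
--             if cell in visited: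
--                 continue
--             visited.add(cell)
--             component.add(cell)
--             for neighbor in border_neighbors(cell, width, height):
--                 if neighbor in black_set and neighbor not in visited:
--                     stack.append(neighbor)
--
--         component_corners = component & corners_set
--         for cell in component:
--             valid = valid_corners_for_cell(cell, width, height)
--             if not (component_corners & valid):
--                 return False
--
--     return True
-- ===== SOURCE B (Python) =====
-- def is_border_cell(row, col, width, height):
--     return row == 0 or col == 0 or row == height - 1 or col == width - 1
--
--
-- def valid_corners_for_cell(cell, width, height):
--     row, col = cell
--     out = []
--     if row == 0:
--         out += [(0, 0), (0, width - 1)]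
--     if row == height - 1:
--         out += [(height - 1, 0), (height - 1, width - 1)]
--     if col == 0:
--         out += [(0, 0), (height - 1, 0)]
--     if col == width - 1:
--         out += [(0, width - 1), (height - 1, width - 1)]
--     return out
--
--
-- def validate_black_cells(width, height, black_cells):
--     black = {tuple(cell) for cell in black_cells}
--     if len(black) > 4:
--         return False
--     if any(not is_border_cell(r, c, width, height) for r, c in black):
--         return False
--     for cell in black:
--         # saturate the set reachable from `cell` inside `black` via grid adjacency
--         reach = {cell}
--         for _ in range(len(black)):
--             reach |= {b for b in black
--                       if any(abs(a[0] - b[0]) + abs(a[1] - b[1]) == 1 for a in reach)}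
--         if not any(k in reach for k in valid_corners_for_cell(cell, width, height)):
--             return False
--     return True
-- ===== Notes on version B (the rewrite author's own statement) =====
-- stated objective: simpler
-- what changed: Replaces the explicit-stack DFS with a shared visited set, per-component accumulation and component-corner intersection checks by a per-cell reachability saturation (|black| rounds of neighbour closure over the <=5-cell black set) with a direct existential corner test, removing the visited/component machinery.
-- outside the precondition, e.g. on validate_black_cells(3, 3, [(0, 3), (0, 2)]): A returns False, B returns True
import Mathlib
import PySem

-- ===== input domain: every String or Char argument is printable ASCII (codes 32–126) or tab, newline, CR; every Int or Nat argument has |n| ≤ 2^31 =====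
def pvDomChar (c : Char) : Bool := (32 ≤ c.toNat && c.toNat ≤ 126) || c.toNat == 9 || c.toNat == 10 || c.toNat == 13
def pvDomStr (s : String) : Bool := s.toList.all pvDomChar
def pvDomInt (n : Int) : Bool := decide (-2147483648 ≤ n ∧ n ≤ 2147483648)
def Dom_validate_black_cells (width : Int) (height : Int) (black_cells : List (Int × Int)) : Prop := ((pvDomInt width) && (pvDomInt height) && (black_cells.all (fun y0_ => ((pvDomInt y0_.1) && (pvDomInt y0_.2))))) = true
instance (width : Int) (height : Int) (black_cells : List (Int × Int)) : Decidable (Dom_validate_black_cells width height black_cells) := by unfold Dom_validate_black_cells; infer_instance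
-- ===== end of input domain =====

-- B replaces A's explicit-stack DFS over shared visited/component sets by a per-cell
-- neighbour-closure saturation with a direct existential corner test (objective: simpler).

-- ===== PORT A =====
def isBorderCell (row col width height : Int) : Bool :=
  row == 0 || col == 0 || row == height - 1 || col == width - 1

-- Python builds `neighbors` by appending every candidate passing the test: a filter of the candidate list
def borderNeighbors (cell : Int × Int) (width height : Int) : List (Int × Int) :=
  [(cell.1 - 1, cell.2), (cell.1 + 1, cell.2), (cell.1, cell.2 - 1), (cell.1, cell.2 + 1)].filter
    (fun rc => decide (0 ≤ rc.1) && decide (rc.1 < height) && decide (0 ≤ rc.2) && decide (rc.2 < width)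
      && isBorderCell rc.1 rc.2 width height)

def cornersSet (width height : Int) : PySem.Set (Int × Int) :=
  PySem.Set.ofList [(0, 0), (0, width - 1), (height - 1, 0), (height - 1, width - 1)]

def validCornersForCell (cell : Int × Int) (width height : Int) : PySem.Set (Int × Int) :=
  let v0 : PySem.Set (Int × Int) := PySem.Set.empty
  let v1 := if cell.1 == 0 then PySem.Set.union v0 [(0, 0), (0, width - 1)] else v0
  let v2 := if cell.1 == height - 1 then PySem.Set.union v1 [(height - 1, 0), (height - 1, width - 1)] else v1
  let v3 := if cell.2 == 0 then PySem.Set.union v2 [(0, 0), (height - 1, 0)] else v2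
  if cell.2 == width - 1 then PySem.Set.union v3 [(0, width - 1), (height - 1, width - 1)] else v3

-- termination helper for the DFS stack loop (cited in the decreasing_by proof below)
theorem pv_filter_length_lt {α : Type} (l : List α) (p q : α → Bool)
    (himp : ∀ x, q x = true → p x = true) (c : α) (hc : c ∈ l) (hp : p c = true)
    (hq : q c = false) : (l.filter q).length < (l.filter p).length := by
  have hsub : (l.filter q).Sublist (l.filter p) := List.monotone_filter_right l himp
  refine lt_of_le_of_ne hsub.length_le (fun hlen => ?_)
  have heq := hsub.eq_of_length hlen
  have hcp : c ∈ l.filter p := List.mem_filter.mpr ⟨hc, hp⟩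
  rw [← heq] at hcp
  have := (List.mem_filter.mp hcp).2
  rw [hq] at this
  exact Bool.false_ne_true this

theorem borderNeighbors_length_le (cell : Int × Int) (width height : Int) :
    (borderNeighbors cell width height).length ≤ 4 := by
  have := List.length_filter_le
    (fun rc : Int × Int => decide (0 ≤ rc.1) && decide (rc.1 < height) && decide (0 ≤ rc.2) && decide (rc.2 < width)
      && isBorderCell rc.1 rc.2 width height)
    [(cell.1 - 1, cell.2), (cell.1 + 1, cell.2), (cell.1, cell.2 - 1), (cell.1, cell.2 + 1)]
  simpa [borderNeighbors] using this

-- the DFS `while stack:` loop; `visited`/`component` are Python sets, the stack's top is the list head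
def dfsLoop (black : List (Int × Int)) (width height : Int) :
    (stack : List (Int × Int)) → PySem.Set (Int × Int) → PySem.Set (Int × Int) →
    (∀ c ∈ stack, c ∈ black) → PySem.Set (Int × Int) × PySem.Set (Int × Int)
  | [], visited, comp, _ => (visited, comp)
  | c :: rest, visited, comp, hs =>
    if h : PySem.Set.contains visited c = true then
      dfsLoop black width height rest visited comp (fun x hx => hs x (List.mem_cons_of_mem _ hx))
    else
      let visited' := PySem.Set.add visited c
      let comp' := PySem.Set.add comp c
      let pushed := (borderNeighbors c width height).filter
        (fun n => PySem.Set.contains black n && !(PySem.Set.contains visited' n))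
      -- Python appends the neighbors in order and pops from the end: reversed onto the head-top stack
      dfsLoop black width height (pushed.reverse ++ rest) visited' comp'
        (fun x hx => by
          rcases List.mem_append.mp hx with hx | hx
          · have := (List.mem_filter.mp (List.mem_reverse.mp hx)).2
            exact (PySem.Set.contains_iff _ _).mp ((Bool.and_eq_true _ _).mp this).1
          · exact hs x (List.mem_cons_of_mem _ hx))
termination_by stack visited _ _ =>
  5 * (black.filter (fun b => !(PySem.Set.contains visited b))).length + stack.length
decreasing_by
  · simp
  · have h1 : (black.filter (fun b => !(PySem.Set.contains (PySem.Set.add visited c) b))).length <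
        (black.filter (fun b => !(PySem.Set.contains visited b))).length := by
      refine pv_filter_length_lt black _ _ ?himp c (hs c List.mem_cons_self) ?hp ?hq
      case himp =>
        intro x hx
        simp only [Bool.not_eq_true'] at hx ⊢
        rw [← Bool.not_eq_true] at hx ⊢
        intro hcx
        exact hx ((PySem.Set.contains_iff _ _).mpr
          ((PySem.Set.mem_add visited c x).mpr (Or.inl ((PySem.Set.contains_iff _ _).mp hcx))))
      case hp =>
        simp only [Bool.not_eq_true']
        exact Bool.eq_false_iff.mpr h
      case hq =>
        have hcc : PySem.Set.contains (PySem.Set.add visited c) c = true :=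
          (PySem.Set.contains_iff _ _).mpr ((PySem.Set.mem_add visited c c).mpr (Or.inr rfl))
        rw [hcc]
        rfl
    have h2 : ((borderNeighbors c width height).filter
        (fun n => PySem.Set.contains black n && !(PySem.Set.contains (PySem.Set.add visited c) n))).length ≤ 4 :=
      le_trans (List.length_filter_le _ _) (borderNeighbors_length_le c width height)
    simp only [List.length_append, List.length_reverse, List.length_cons]
    omega

-- the `for start in list(black_set):` loop of A
def outerLoop (black : List (Int × Int)) (width height : Int) (corners : PySem.Set (Int × Int)) :
    (starts : List (Int × Int)) → PySem.Set (Int × Int) →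
    (∀ c ∈ starts, c ∈ black) → Bool
  | [], _, _ => true
  | s :: rest, visited, hs =>
    if PySem.Set.contains visited s = true then
      outerLoop black width height corners rest visited (fun x hx => hs x (List.mem_cons_of_mem _ hx))
    else
      let r := dfsLoop black width height [s] visited PySem.Set.empty
        (fun x hx => by rw [List.mem_singleton.mp hx]; exact hs s List.mem_cons_self)
      let componentCorners := PySem.Set.inter r.2 corners
      -- `for cell in component: if not (component_corners & valid): return False`
      if r.2.any (fun cell =>
          (PySem.Set.inter componentCorners (validCornersForCell cell width height)).isEmpty) then
        false
      else
        outerLoop black width height corners rest r.1 (fun x hx => hs x (List.mem_cons_of_mem _ hx))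

def validate_black_cells (width : Int) (height : Int) (black_cells : List (Int × Int)) : Bool :=
  let blackSet : PySem.Set (Int × Int) := PySem.Set.ofList black_cells
  if PySem.Set.len blackSet > 4 then false
  else if blackSet.any (fun rc => !(isBorderCell rc.1 rc.2 width height)) then false
  else if blackSet.isEmpty then true
  else outerLoop blackSet width height (cornersSet width height) blackSet PySem.Set.empty (fun _ h => h)

-- ===== PORT B =====
def isBorderCellB (row col width height : Int) : Bool :=
  row == 0 || col == 0 || row == height - 1 || col == width - 1

def validCornersB (cell : Int × Int) (width height : Int) : List (Int × Int) :=
  ((if cell.1 == 0 then [((0 : Int), (0 : Int)), (0, width - 1)] else []) ++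
   (if cell.1 == height - 1 then [(height - 1, 0), (height - 1, width - 1)] else [])) ++
  ((if cell.2 == 0 then [(0, 0), (height - 1, 0)] else []) ++
   (if cell.2 == width - 1 then [(0, width - 1), (height - 1, width - 1)] else []))

-- one round of `reach |= {b for b in black if any(manhattan(a,b) == 1 for a in reach)}`
def satStep (black : List (Int × Int)) (reach : PySem.Set (Int × Int)) : PySem.Set (Int × Int) :=
  PySem.Set.union reach (PySem.Set.ofList (black.filter (fun b =>
    reach.any (fun a => ((a.1 - b.1).natAbs + (a.2 - b.2).natAbs) == 1))))

def satReach (black : List (Int × Int)) (cell : Int × Int) : PySem.Set (Int × Int) :=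
  (List.range black.length).foldl (fun r _ => satStep black r) (PySem.Set.ofList [cell])

def validate_black_cells_alt (width : Int) (height : Int) (black_cells : List (Int × Int)) : Bool :=
  let black : PySem.Set (Int × Int) := PySem.Set.ofList black_cells
  if PySem.Set.len black > 4 then false
  else if black.any (fun rc => !(isBorderCellB rc.1 rc.2 width height)) then false
  else black.all (fun cell =>
    (validCornersB cell width height).any (fun k => PySem.Set.contains (satReach black cell) k))

-- ===== PRECONDITION & SPEC =====
-- Pre_ excludes only the inputs where some black cell lies outside the grid while all black
-- cells pass A's border test and at most 4 are distinct: there A's border test accepts the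
-- out-of-grid cell (e.g. row == 0 with col ≥ width) but the neighbour relation becomes
-- asymmetric and A's answer depends on Python's set-iteration (hash) order — e.g.
-- (3, 3, [(0, 3), (0, 2)]). Inputs caught by A's early exits (more than 4 distinct cells,
-- or a non-border cell) are admitted.
def Pre_validate_black_cells (width : Int) (height : Int) (black_cells : List (Int × Int)) : Prop :=
  4 < PySem.Set.len (PySem.Set.ofList black_cells)
  ∨ (∃ p ∈ black_cells, ¬(p.1 = 0 ∨ p.2 = 0 ∨ p.1 = height - 1 ∨ p.2 = width - 1))
  ∨ (∀ p ∈ black_cells, 0 ≤ p.1 ∧ p.1 < height ∧ 0 ≤ p.2 ∧ p.2 < width)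
instance (width : Int) (height : Int) (black_cells : List (Int × Int)) : Decidable (Pre_validate_black_cells width height black_cells) := by unfold Pre_validate_black_cells; infer_instance

def pvWitness_validate_black_cells : Int × Int × (List (Int × Int)) := (3, 3, [(0, 0), (0, 1)])

def Spec_validate_black_cells (width : Int) (height : Int) (black_cells : List (Int × Int)) (out : Bool) : Prop := out = validate_black_cells_alt width height black_cells
instance (width : Int) (height : Int) (black_cells : List (Int × Int)) (out : Bool) : Decidable (Spec_validate_black_cells width height black_cells out) := by unfold Spec_validate_black_cells; infer_instance

-- ===== CLAIM (what is proved, stated in full; the proofs are below) =====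
def Claim_equal_validate_black_cells : Prop := ∀ (width : Int) (height : Int) (black_cells : List (Int × Int)), Dom_validate_black_cells width height black_cells → Pre_validate_black_cells width height black_cells → Spec_validate_black_cells width height black_cells (validate_black_cells width height black_cells)

-- ===== LEMMAS AND PROOFS =====

-- the adjacency relation A's DFS pushes along: b is an in-grid border neighbour of a and black
def AdjA (black : List (Int × Int)) (width height : Int) (a b : Int × Int) : Prop :=
  b ∈ borderNeighbors a width height ∧ b ∈ black

def Reach (black : List (Int × Int)) (width height : Int) : Int × Int → Int × Int → Prop :=
  Relation.ReflTransGen (AdjA black width height)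

-- reachability whose every step lands outside V (the DFS's pruning by `visited`)
def ReachAv (black : List (Int × Int)) (width height : Int) (V : List (Int × Int)) :
    Int × Int → Int × Int → Prop :=
  Relation.ReflTransGen (fun a b => AdjA black width height a b ∧ b ∉ V)

-- the per-cell condition both programs decide: some corner valid for x lies in x's black component
def GoodA (black : List (Int × Int)) (width height : Int) (x : Int × Int) : Prop :=
  ∃ k ∈ validCornersB x width height, k ∈ black ∧ Reach black width height x k

-- A's valid corner set and B's valid corner list have the same members
theorem mem_validCorners_iff (cell : Int × Int) (width height : Int) (k : Int × Int) :
    k ∈ validCornersForCell cell width height ↔ k ∈ validCornersB cell width height := by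
  unfold validCornersForCell validCornersB
  split_ifs <;>
    simp [PySem.Set.mem_union, PySem.Set.empty] <;> tauto

-- every valid corner is one of the four grid corners
theorem validCornersB_subset (cell : Int × Int) (width height : Int) (k : Int × Int) :
    k ∈ validCornersB cell width height → k ∈ cornersSet width height := by
  unfold validCornersB cornersSet
  intro hk
  rw [PySem.Set.mem_ofList]
  split_ifs at hk <;> simp at hk ⊢ <;> tauto

theorem mem_borderNeighbors (a b : Int × Int) (width height : Int) :
    b ∈ borderNeighbors a width height ↔
      ((a.1 - b.1).natAbs + (a.2 - b.2).natAbs = 1) ∧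
      0 ≤ b.1 ∧ b.1 < height ∧ 0 ≤ b.2 ∧ b.2 < width ∧
      isBorderCell b.1 b.2 width height = true := by
  obtain ⟨a1, a2⟩ := a; obtain ⟨b1, b2⟩ := b
  simp only [borderNeighbors, List.mem_filter, List.mem_cons, List.not_mem_nil, or_false,
    Prod.mk.injEq, Bool.and_eq_true, decide_eq_true_eq]
  constructor
  · rintro ⟨hmem, ⟨⟨⟨h1, h2⟩, h3⟩, h4⟩, h5⟩
    refine ⟨?_, h1, h2, h3, h4, h5⟩
    rcases hmem with ⟨e1, e2⟩ | ⟨e1, e2⟩ | ⟨e1, e2⟩ | ⟨e1, e2⟩ <;> omega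
  · rintro ⟨hman, h1, h2, h3, h4, h5⟩
    refine ⟨?_, ⟨⟨⟨h1, h2⟩, h3⟩, h4⟩, h5⟩
    omega

theorem adjA_symm (black : List (Int × Int)) (width height : Int)
    (Hb : ∀ p ∈ black, isBorderCell p.1 p.2 width height = true)
    (Hg : ∀ p ∈ black, 0 ≤ p.1 ∧ p.1 < height ∧ 0 ≤ p.2 ∧ p.2 < width)
    {a b : Int × Int} (ha : a ∈ black) (hab : AdjA black width height a b) :
    AdjA black width height b a := by
  obtain ⟨hbn, hbb⟩ := hab
  have h1 := (mem_borderNeighbors a b width height).mp hbn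
  refine ⟨(mem_borderNeighbors b a width height).mpr ?_, ha⟩
  obtain ⟨hg1, hg2, hg3, hg4⟩ := Hg a ha
  exact ⟨by omega, hg1, hg2, hg3, hg4, Hb a ha⟩

theorem reach_mem {black : List (Int × Int)} {width height : Int} {a x : Int × Int}
    (ha : a ∈ black) (hr : Reach black width height a x) : x ∈ black := by
  induction hr with
  | refl => exact ha
  | tail _ h2 _ => exact h2.2

theorem reach_symm {black : List (Int × Int)} {width height : Int}
    (Hb : ∀ p ∈ black, isBorderCell p.1 p.2 width height = true)
    (Hg : ∀ p ∈ black, 0 ≤ p.1 ∧ p.1 < height ∧ 0 ≤ p.2 ∧ p.2 < width)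
    {a x : Int × Int} (ha : a ∈ black) (hr : Reach black width height a x) :
    Reach black width height x a := by
  induction hr with
  | refl => exact .refl
  | tail h1 h2 ih =>
    exact Relation.ReflTransGen.head (adjA_symm black width height Hb Hg (reach_mem ha h1) h2) ih

theorem reachAv_mono {black : List (Int × Int)} {width height : Int} {V W : List (Int × Int)}
    (hVW : ∀ x, x ∈ W → x ∈ V) {s x : Int × Int} (h : ReachAv black width height V s x) :
    ReachAv black width height W s x :=
  Relation.ReflTransGen.mono (fun a b hab => ⟨hab.1, fun hbW => hab.2 (hVW b hbW)⟩) h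

theorem reachAv_congr {black : List (Int × Int)} {width height : Int} {V W : List (Int × Int)}
    (hVW : ∀ x, x ∈ W ↔ x ∈ V) {s x : Int × Int} :
    ReachAv black width height V s x ↔ ReachAv black width height W s x :=
  ⟨reachAv_mono (fun y hy => (hVW y).mp hy), reachAv_mono (fun y hy => (hVW y).mpr hy)⟩

theorem reachAv_to_reach {black : List (Int × Int)} {width height : Int} {V : List (Int × Int)}
    {s x : Int × Int} (h : ReachAv black width height V s x) : Reach black width height s x :=
  Relation.ReflTransGen.mono (fun _ _ hab => hab.1) h

theorem reachAv_last_not_mem {black : List (Int × Int)} {width height : Int}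
    {V : List (Int × Int)} {s x : Int × Int} (hs : s ∉ V)
    (h : ReachAv black width height V s x) : x ∉ V := by
  induction h with
  | refl => exact hs
  | tail _ h2 _ => exact h2.2

-- inside a closed visited set's complement, pruned and plain reachability agree
theorem reach_to_reachAv {black : List (Int × Int)} {width height : Int} {V : List (Int × Int)}
    (Hb : ∀ p ∈ black, isBorderCell p.1 p.2 width height = true)
    (Hg : ∀ p ∈ black, 0 ≤ p.1 ∧ p.1 < height ∧ 0 ≤ p.2 ∧ p.2 < width)
    (Hcl : ∀ x ∈ V, ∀ y, AdjA black width height x y → y ∈ V)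
    {s x : Int × Int} (hsb : s ∈ black) (hsV : s ∉ V)
    (hr : Reach black width height s x) : ReachAv black width height V s x := by
  induction hr with
  | refl => exact .refl
  | @tail y x h1 h2 ih =>
    have hyB : y ∈ black := reach_mem hsb h1
    have hyV : y ∉ V := reachAv_last_not_mem hsV ih
    have hxV : x ∉ V := fun hxV =>
      hyV (Hcl x hxV y (adjA_symm black width height Hb Hg hyB h2))
    exact ih.tail ⟨h2, hxV⟩

-- removing the freshly visited vertex c from the avoided set
theorem reachAv_elim {black : List (Int × Int)} {width height : Int} {V : List (Int × Int)}
    (c : Int × Int) {s x : Int × Int} (h : ReachAv black width height V s x) :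
    x = c ∨ ∃ s', ((s' = s ∧ s ≠ c) ∨ (AdjA black width height c s' ∧ s' ∉ V ∧ s' ≠ c)) ∧
      ReachAv black width height (c :: V) s' x := by
  induction h with
  | refl =>
    by_cases hsc : s = c
    · exact Or.inl hsc
    · exact Or.inr ⟨s, Or.inl ⟨rfl, hsc⟩, .refl⟩
  | @tail y x h1 h2 ih =>
    by_cases hxc : x = c
    · exact Or.inl hxc
    · rcases ih with rfl | ⟨s', hs', hp⟩
      · exact Or.inr ⟨x, Or.inr ⟨h2.1, h2.2, hxc⟩, .refl⟩
      · refine Or.inr ⟨s', hs', hp.tail ⟨h2.1, ?_⟩⟩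
        simp only [List.mem_cons, not_or]
        exact ⟨hxc, h2.2⟩

-- the DFS step rewrites the pending-frontier description
theorem dfs_step_key {black : List (Int × Int)} {width height : Int}
    {visited : PySem.Set (Int × Int)} {c : Int × Int} {rest pushed : List (Int × Int)}
    (hcv : c ∉ visited)
    (hpush : ∀ n, n ∈ pushed ↔ AdjA black width height c n ∧ n ∉ visited ∧ n ≠ c)
    (x : Int × Int) :
    (x = c ∨ ∃ s ∈ pushed ++ rest, s ∉ PySem.Set.add visited c ∧
        ReachAv black width height (PySem.Set.add visited c) s x) ↔
      (∃ s ∈ c :: rest, s ∉ visited ∧ ReachAv black width height visited s x) := by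
  have hmemadd : ∀ y : Int × Int, y ∈ PySem.Set.add visited c ↔ y ∈ visited ∨ y = c :=
    fun y => PySem.Set.mem_add visited c y
  have hconv : ∀ {s' x' : Int × Int}, ReachAv black width height (c :: visited) s' x' ↔
      ReachAv black width height (PySem.Set.add visited c) s' x' :=
    fun {s' x'} => reachAv_congr (fun y => by rw [hmemadd y, List.mem_cons]; tauto)
  constructor
  · rintro (hxc | ⟨s, hsm, hsv', hp⟩)
    · subst hxc; exact ⟨x, List.mem_cons_self, hcv, .refl⟩
    · have hsv : s ∉ visited := fun hv => hsv' ((hmemadd s).mpr (Or.inl hv))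
      have hp' : ReachAv black width height visited s x :=
        reachAv_mono (fun y hy => (hmemadd y).mpr (Or.inl hy)) hp
      rcases List.mem_append.mp hsm with hsp | hsr
      · obtain ⟨hAdj, hsnv, _⟩ := (hpush s).mp hsp
        exact ⟨c, List.mem_cons_self, hcv, Relation.ReflTransGen.head ⟨hAdj, hsnv⟩ hp'⟩
      · exact ⟨s, List.mem_cons_of_mem _ hsr, hsv, hp'⟩
  · rintro ⟨s, hsm, hsv, hp⟩
    rcases reachAv_elim c hp with hxc | ⟨s', hs', hp'⟩
    · exact Or.inl hxc
    · refine Or.inr ?_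
      rcases hs' with ⟨heq, hsc⟩ | ⟨hAdj, hs'v, hs'c⟩
      · subst heq
        have hsr : s' ∈ rest := by
          rcases List.mem_cons.mp hsm with h' | h'
          · exact absurd h' hsc
          · exact h'
        refine ⟨s', List.mem_append.mpr (Or.inr hsr), ?_, hconv.mp hp'⟩
        rw [hmemadd]; push_neg; exact ⟨hsv, hsc⟩
      · refine ⟨s', List.mem_append.mpr (Or.inl ((hpush s').mpr ⟨hAdj, hs'v, hs'c⟩)), ?_,
          hconv.mp hp'⟩
        rw [hmemadd]; push_neg; exact ⟨hs'v, hs'c⟩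

-- what the DFS loop computes: visited and component each grow by the cells
-- reachable from an unvisited stack entry while avoiding the old visited set
theorem dfsLoop_spec (black : List (Int × Int)) (width height : Int)
    (stack : List (Int × Int)) (visited comp : PySem.Set (Int × Int))
    (hs : ∀ c ∈ stack, c ∈ black) :
    (∀ x, x ∈ (dfsLoop black width height stack visited comp hs).1 ↔
      x ∈ visited ∨ ∃ s ∈ stack, s ∉ visited ∧ ReachAv black width height visited s x) ∧
    (∀ x, x ∈ (dfsLoop black width height stack visited comp hs).2 ↔
      x ∈ comp ∨ ∃ s ∈ stack, s ∉ visited ∧ ReachAv black width height visited s x) := by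
  induction stack, visited, comp, hs using dfsLoop.induct black width height with
  | case1 visited comp hx _ =>
    rw [dfsLoop]
    constructor <;> intro x <;> simp
  | case2 c rest visited comp hs hcv _ ih =>
    rw [dfsLoop, dif_pos hcv]
    have hcm : c ∈ visited := (PySem.Set.contains_iff _ _).mp hcv
    have hrw : ∀ x, (∃ s ∈ rest, s ∉ visited ∧ ReachAv black width height visited s x) ↔
        (∃ s ∈ c :: rest, s ∉ visited ∧ ReachAv black width height visited s x) := by
      intro x
      constructor
      · rintro ⟨s, hsm, hsv, hp⟩; exact ⟨s, List.mem_cons_of_mem _ hsm, hsv, hp⟩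
      · rintro ⟨s, hsm, hsv, hp⟩
        rcases List.mem_cons.mp hsm with heq | hsm'
        · exact absurd (heq ▸ hcm) hsv
        · exact ⟨s, hsm', hsv, hp⟩
    exact ⟨fun x => (ih.1 x).trans (by rw [hrw x]),
           fun x => (ih.2 x).trans (by rw [hrw x])⟩
  | case3 c rest visited comp hs hcv visited' comp' pushed hdup ih =>
    rw [dfsLoop, dif_neg hcv]
    have hcvm : c ∉ visited := fun hm => hcv ((PySem.Set.contains_iff _ _).mpr hm)
    have hpush : ∀ n, n ∈ ((borderNeighbors c width height).filter
        (fun n => PySem.Set.contains black n && !(PySem.Set.contains (PySem.Set.add visited c) n))).reverse ↔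
        AdjA black width height c n ∧ n ∉ visited ∧ n ≠ c := by
      intro n
      rw [List.mem_reverse, List.mem_filter]
      constructor
      · rintro ⟨hbn, hf⟩
        obtain ⟨hb1, hb2⟩ := (Bool.and_eq_true _ _).mp hf
        have hb2' : PySem.Set.contains (PySem.Set.add visited c) n = false := by
          simpa using hb2
        have hnv' : n ∉ PySem.Set.add visited c := fun hm => by
          rw [(PySem.Set.contains_iff _ _).mpr hm] at hb2'
          exact Bool.noConfusion hb2'
        rw [PySem.Set.mem_add] at hnv'
        push_neg at hnv'
        exact ⟨⟨hbn, (PySem.Set.contains_iff _ _).mp hb1⟩, hnv'.1, hnv'.2⟩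
      · rintro ⟨⟨hbn, hnb⟩, hnv, hnc⟩
        refine ⟨hbn, (Bool.and_eq_true _ _).mpr ⟨(PySem.Set.contains_iff _ _).mpr hnb, ?_⟩⟩
        have hnm : n ∉ PySem.Set.add visited c := by
          rw [PySem.Set.mem_add]; push_neg; exact ⟨hnv, hnc⟩
        rw [Bool.not_eq_true', Bool.eq_false_iff]
        intro hm
        exact absurd ((PySem.Set.contains_iff _ _).mp hm) hnm
    have hkey := fun x => dfs_step_key (black := black) (width := width) (height := height)
      (visited := visited) (c := c) (rest := rest) hcvm hpush x
    constructor
    · intro x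
      rw [ih.1 x]
      rw [PySem.Set.mem_add]
      constructor
      · rintro (⟨hv | hc⟩ | ⟨s, hsm, hsv, hp⟩)
        · exact Or.inl hv
        · rcases (hkey x).mp (Or.inl hc) with ⟨s, hsm, hsv, hp⟩
          exact Or.inr ⟨s, hsm, hsv, hp⟩
        · rcases (hkey x).mp (Or.inr ⟨s, hsm, hsv, hp⟩) with ⟨s', h1, h2, h3⟩
          exact Or.inr ⟨s', h1, h2, h3⟩
      · rintro (hv | hex)
        · exact Or.inl (Or.inl hv)
        · rcases (hkey x).mpr hex with hc | ⟨s, h1, h2, h3⟩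
          · exact Or.inl (Or.inr hc)
          · exact Or.inr ⟨s, h1, h2, h3⟩
    · intro x
      rw [ih.2 x]
      rw [PySem.Set.mem_add]
      constructor
      · rintro (⟨hv | hc⟩ | ⟨s, hsm, hsv, hp⟩)
        · exact Or.inl hv
        · rcases (hkey x).mp (Or.inl hc) with ⟨s, hsm, hsv, hp⟩
          exact Or.inr ⟨s, hsm, hsv, hp⟩
        · rcases (hkey x).mp (Or.inr ⟨s, hsm, hsv, hp⟩) with ⟨s', h1, h2, h3⟩
          exact Or.inr ⟨s', h1, h2, h3⟩
      · rintro (hv | hex)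
        · exact Or.inl (Or.inl hv)
        · rcases (hkey x).mpr hex with hc | ⟨s, h1, h2, h3⟩
          · exact Or.inl (Or.inr hc)
          · exact Or.inr ⟨s, h1, h2, h3⟩


-- nonemptiness of A's corner intersection at `cell` is exactly GoodA at `cell`
theorem cell_check_iff (black : List (Int × Int)) (width height : Int)
    (Hb : ∀ p ∈ black, isBorderCell p.1 p.2 width height = true)
    (Hg : ∀ p ∈ black, 0 ≤ p.1 ∧ p.1 < height ∧ 0 ≤ p.2 ∧ p.2 < width)
    (C : PySem.Set (Int × Int)) (s : Int × Int) (hsb : s ∈ black)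
    (hC : ∀ x, x ∈ C ↔ Reach black width height s x)
    (cell : Int × Int) (hcell : Reach black width height s cell) :
    (∃ y, y ∈ PySem.Set.inter (PySem.Set.inter C (cornersSet width height))
        (validCornersForCell cell width height)) ↔
      GoodA black width height cell := by
  constructor
  · rintro ⟨y, hy⟩
    rw [PySem.Set.mem_inter] at hy
    obtain ⟨hy1, hyv⟩ := hy
    rw [PySem.Set.mem_inter] at hy1
    obtain ⟨hyC, _⟩ := hy1
    have hys : Reach black width height s y := (hC y).mp hyC
    refine ⟨y, (mem_validCorners_iff cell width height y).mp hyv, reach_mem hsb hys, ?_⟩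
    exact (reach_symm Hb Hg hsb hcell).trans hys
  · rintro ⟨k, hkv, hkb, hkr⟩
    refine ⟨k, ?_⟩
    rw [PySem.Set.mem_inter, PySem.Set.mem_inter]
    exact ⟨⟨(hC k).mpr (hcell.trans hkr), validCornersB_subset cell width height k hkv⟩,
      (mem_validCorners_iff cell width height k).mpr hkv⟩

-- A's per-component loop passes iff every component member is GoodA
theorem component_check (black : List (Int × Int)) (width height : Int)
    (Hb : ∀ p ∈ black, isBorderCell p.1 p.2 width height = true)
    (Hg : ∀ p ∈ black, 0 ≤ p.1 ∧ p.1 < height ∧ 0 ≤ p.2 ∧ p.2 < width)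
    (C : PySem.Set (Int × Int)) (s : Int × Int) (hsb : s ∈ black)
    (hC : ∀ x, x ∈ C ↔ Reach black width height s x) :
    (C.any (fun cell =>
      (PySem.Set.inter (PySem.Set.inter C (cornersSet width height))
        (validCornersForCell cell width height)).isEmpty) = false) ↔
    (∀ x, Reach black width height s x → GoodA black width height x) := by
  rw [List.any_eq_false]
  constructor
  · intro hall x hx
    have h1 := hall x ((hC x).mpr hx)
    simp only [Bool.not_eq_true, List.isEmpty_eq_false_iff_exists_mem] at h1
    exact (cell_check_iff black width height Hb Hg C s hsb hC x hx).mp h1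
  · intro hgood cell hcm
    simp only [Bool.not_eq_true, List.isEmpty_eq_false_iff_exists_mem]
    have hcr : Reach black width height s cell := (hC cell).mp hcm
    exact (cell_check_iff black width height Hb Hg C s hsb hC cell hcr).mpr (hgood cell hcr)

-- the else-branch of A's outer loop, for an abstract DFS result r
theorem outer_else_iff (black : List (Int × Int)) (width height : Int)
    (Hb : ∀ p ∈ black, isBorderCell p.1 p.2 width height = true)
    (Hg : ∀ p ∈ black, 0 ≤ p.1 ∧ p.1 < height ∧ 0 ≤ p.2 ∧ p.2 < width)
    (rest : List (Int × Int)) (visited : PySem.Set (Int × Int))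
    (r : PySem.Set (Int × Int) × PySem.Set (Int × Int)) (s : Int × Int)
    (hs' : ∀ c ∈ rest, c ∈ black) (hsb : s ∈ black) (hsv' : s ∉ visited)
    (HVb : ∀ x ∈ visited, x ∈ black)
    (Hcl : ∀ x ∈ visited, ∀ y, AdjA black width height x y → y ∈ visited)
    (hVisMem : ∀ x, x ∈ r.1 ↔ x ∈ visited ∨ Reach black width height s x)
    (hCompMem : ∀ x, x ∈ r.2 ↔ Reach black width height s x)
    (ihspec : ∀ (V : PySem.Set (Int × Int)) (hsX : ∀ c ∈ rest, c ∈ black),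
      (∀ x ∈ V, x ∈ black) → (∀ x ∈ V, ∀ y, AdjA black width height x y → y ∈ V) →
      (outerLoop black width height (cornersSet width height) rest V hsX = true ↔
        ∀ s' ∈ rest, s' ∉ V → ∀ x, Reach black width height s' x → GoodA black width height x)) :
    ((if r.2.any (fun cell =>
        (PySem.Set.inter (PySem.Set.inter r.2 (cornersSet width height))
          (validCornersForCell cell width height)).isEmpty) = true then false
      else outerLoop black width height (cornersSet width height) rest r.1 hs') = true ↔
      ∀ s' ∈ s :: rest, s' ∉ visited →
        ∀ x, Reach black width height s' x → GoodA black width height x) := by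
  have hcc := component_check black width height Hb Hg r.2 s hsb hCompMem
  by_cases hchk : (r.2.any (fun cell =>
      (PySem.Set.inter (PySem.Set.inter r.2 (cornersSet width height))
        (validCornersForCell cell width height)).isEmpty)) = true
  · rw [if_pos hchk]
    simp only [Bool.false_eq_true, false_iff]
    intro hall
    have hfalse := hcc.mpr (fun x hx => hall s List.mem_cons_self hsv' x hx)
    rw [hfalse] at hchk
    exact Bool.noConfusion hchk
  · rw [if_neg hchk]
    have hpass := hcc.mp (Bool.eq_false_iff.mpr hchk)
    have HVb2 : ∀ x ∈ r.1, x ∈ black := by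
      intro x hx
      rcases (hVisMem x).mp hx with hm | hr
      · exact HVb x hm
      · exact reach_mem hsb hr
    have Hcl2 : ∀ x ∈ r.1, ∀ y, AdjA black width height x y → y ∈ r.1 := by
      intro x hx y hxy
      rcases (hVisMem x).mp hx with hm | hr
      · exact (hVisMem y).mpr (Or.inl (Hcl x hm y hxy))
      · exact (hVisMem y).mpr (Or.inr (hr.tail hxy))
    rw [ihspec r.1 hs' HVb2 Hcl2]
    constructor
    · intro hrest s' hs'm hs'v
      rcases List.mem_cons.mp hs'm with heq | hs'r
      · subst heq
        exact hpass
      · by_cases hs'V2 : s' ∈ r.1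
        · rcases (hVisMem s').mp hs'V2 with hm | hr
          · exact absurd hm hs'v
          · intro x hx
            exact hpass x (hr.trans hx)
        · exact hrest s' hs'r hs'V2
    · intro hall s' hs'r hs'v2
      have hs'v : s' ∉ visited := fun hm => hs'v2 ((hVisMem s').mpr (Or.inl hm))
      exact hall s' (List.mem_cons_of_mem _ hs'r) hs'v

-- what A's outer loop decides, for a component-closed visited set
theorem outerLoop_spec (black : List (Int × Int)) (width height : Int)
    (Hb : ∀ p ∈ black, isBorderCell p.1 p.2 width height = true)
    (Hg : ∀ p ∈ black, 0 ≤ p.1 ∧ p.1 < height ∧ 0 ≤ p.2 ∧ p.2 < width)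
    (starts : List (Int × Int)) :
    ∀ (visited : PySem.Set (Int × Int)) (hs : ∀ c ∈ starts, c ∈ black)
      (_ : ∀ x ∈ visited, x ∈ black)
      (_ : ∀ x ∈ visited, ∀ y, AdjA black width height x y → y ∈ visited),
    (outerLoop black width height (cornersSet width height) starts visited hs = true ↔
      ∀ s ∈ starts, s ∉ visited →
        ∀ x, Reach black width height s x → GoodA black width height x) := by
  induction starts with
  | nil =>
    intro visited hs _ _
    rw [outerLoop]
    simp
  | cons s rest ih =>
    intro visited hs HVb Hcl
    have hsb : s ∈ black := hs s List.mem_cons_self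
    rw [outerLoop]
    by_cases hsv : PySem.Set.contains visited s = true
    · rw [if_pos hsv]
      have hsm : s ∈ visited := (PySem.Set.contains_iff _ _).mp hsv
      rw [ih visited (fun c hc => hs c (List.mem_cons_of_mem _ hc)) HVb Hcl]
      constructor
      · intro hrest s' hs'm hs'v
        rcases List.mem_cons.mp hs'm with heq | hs'r
        · exact absurd (heq ▸ hsm) hs'v
        · exact hrest s' hs'r hs'v
      · intro hall s' hs'r hs'v
        exact hall s' (List.mem_cons_of_mem _ hs'r) hs'v
    · rw [if_neg hsv]
      have hsv' : s ∉ visited := fun hm => hsv ((PySem.Set.contains_iff _ _).mpr hm)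
      have hdfs := dfsLoop_spec black width height [s] visited PySem.Set.empty
        (fun x hx => by rw [List.mem_singleton.mp hx]; exact hsb)
      have hAvIff : ∀ x, ReachAv black width height visited s x ↔ Reach black width height s x :=
        fun x => ⟨reachAv_to_reach, reach_to_reachAv Hb Hg Hcl hsb hsv'⟩
      refine outer_else_iff black width height Hb Hg rest visited _ s _ hsb hsv' HVb Hcl
        (fun x => ?_) (fun x => ?_) (fun V hsX hVb hVcl => ih V hsX hVb hVcl)
      · rw [hdfs.1 x]
        constructor
        · rintro (hm | ⟨s', hs'm, _, hp⟩)
          · exact Or.inl hm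
          · rw [List.mem_singleton.mp hs'm] at hp
            exact Or.inr ((hAvIff x).mp hp)
        · rintro (hm | hr)
          · exact Or.inl hm
          · exact Or.inr ⟨s, List.mem_singleton.mpr rfl, hsv', (hAvIff x).mpr hr⟩
      · rw [hdfs.2 x]
        constructor
        · rintro (hm | ⟨s', hs'm, _, hp⟩)
          · exact absurd hm (List.not_mem_nil)
          · rw [List.mem_singleton.mp hs'm] at hp
            exact (hAvIff x).mp hp
        · intro hr
          exact Or.inr ⟨s, List.mem_singleton.mpr rfl, hsv', (hAvIff x).mpr hr⟩

theorem foldl_range_const {α : Type} (f : α → α) (n : Nat) (s : α) :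
    (List.range n).foldl (fun r _ => f r) s = f^[n] s := by
  induction n with
  | zero => simp
  | succ k ih =>
    rw [List.range_succ, List.foldl_append, ih, Function.iterate_succ_apply']
    rfl

theorem satStep_mem (black : List (Int × Int)) (R : PySem.Set (Int × Int)) (x : Int × Int) :
    x ∈ satStep black R ↔
      x ∈ R ∨ (x ∈ black ∧ ∃ a ∈ R, (a.1 - x.1).natAbs + (a.2 - x.2).natAbs = 1) := by
  unfold satStep
  rw [PySem.Set.mem_union, PySem.Set.mem_ofList, List.mem_filter, List.any_eq_true]
  simp only [beq_iff_eq]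

theorem sat_sound (black : List (Int × Int)) (width height : Int) (c : Int × Int)
    (Hb : ∀ p ∈ black, isBorderCell p.1 p.2 width height = true)
    (Hg : ∀ p ∈ black, 0 ≤ p.1 ∧ p.1 < height ∧ 0 ≤ p.2 ∧ p.2 < width)
    (hcb : c ∈ black) (k : Nat) :
    ∀ x ∈ (satStep black)^[k] (PySem.Set.ofList [c]),
      Reach black width height c x ∧ x ∈ black := by
  induction k with
  | zero =>
    intro x hx
    rw [Function.iterate_zero_apply, PySem.Set.mem_ofList, List.mem_singleton] at hx
    subst hx
    exact ⟨.refl, hcb⟩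
  | succ k ih =>
    intro x hx
    rw [Function.iterate_succ_apply', satStep_mem] at hx
    rcases hx with hx | ⟨hxb, a, ha, hman⟩
    · exact ih x hx
    · obtain ⟨hra, _⟩ := ih a ha
      obtain ⟨hg1, hg2, hg3, hg4⟩ := Hg x hxb
      have hadj : AdjA black width height a x :=
        ⟨(mem_borderNeighbors a x width height).mpr ⟨hman, hg1, hg2, hg3, hg4, Hb x hxb⟩, hxb⟩
      exact ⟨hra.tail hadj, hxb⟩

theorem sat_mono (black : List (Int × Int)) (c : Int × Int) {k j : Nat} (hkj : k ≤ j) :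
    ∀ x ∈ (satStep black)^[k] (PySem.Set.ofList [c]),
      x ∈ (satStep black)^[j] (PySem.Set.ofList [c]) := by
  induction j with
  | zero =>
    intro x hx
    rw [Nat.le_zero.mp hkj] at hx
    exact hx
  | succ j ih =>
    intro x hx
    rcases Nat.lt_or_ge k (j + 1) with hl | hg
    · have := ih (Nat.lt_succ_iff.mp hl) x hx
      rw [Function.iterate_succ_apply', satStep_mem]
      exact Or.inl this
    · rw [Nat.le_antisymm hkj hg] at hx
      exact hx

theorem sat_fix_complete (black : List (Int × Int)) (width height : Int) (c : Int × Int)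
    (k : Nat)
    (hfix : ∀ x, x ∈ (satStep black)^[k + 1] (PySem.Set.ofList [c]) ↔
      x ∈ (satStep black)^[k] (PySem.Set.ofList [c]))
    {x : Int × Int} (hr : Reach black width height c x) :
    x ∈ (satStep black)^[k] (PySem.Set.ofList [c]) := by
  induction hr with
  | refl =>
    exact sat_mono black c (Nat.zero_le k) c
      (by rw [Function.iterate_zero_apply, PySem.Set.mem_ofList]; exact List.mem_singleton.mpr rfl)
  | @tail y x h1 h2 ih =>
    have hman := ((mem_borderNeighbors y x width height).mp h2.1).1
    refine (hfix x).mp ?_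
    rw [Function.iterate_succ_apply', satStep_mem]
    exact Or.inr ⟨h2.2, y, ih, hman⟩

theorem sat_exists_fix (black : List (Int × Int)) (width height : Int) (c : Int × Int)
    (Hb : ∀ p ∈ black, isBorderCell p.1 p.2 width height = true)
    (Hg : ∀ p ∈ black, 0 ≤ p.1 ∧ p.1 < height ∧ 0 ≤ p.2 ∧ p.2 < width)
    (hcb : c ∈ black) :
    ∃ k, k < black.length ∧ ∀ x, x ∈ (satStep black)^[k + 1] (PySem.Set.ofList [c]) ↔
      x ∈ (satStep black)^[k] (PySem.Set.ofList [c]) := by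
  by_contra hno
  push_neg at hno
  -- each of the first `length` rounds strictly grows the reach set
  have hcard : ∀ k, k ≤ black.length →
      k + 1 ≤ ((satStep black)^[k] (PySem.Set.ofList [c])).toFinset.card := by
    intro k
    induction k with
    | zero =>
      intro _
      have : c ∈ ((satStep black)^[0] (PySem.Set.ofList [c])).toFinset := by
        rw [List.mem_toFinset, Function.iterate_zero_apply, PySem.Set.mem_ofList]
        exact List.mem_singleton.mpr rfl
      exact Finset.card_pos.mpr ⟨c, this⟩
    | succ k ih =>
      intro hk
      obtain ⟨x, hxdiff⟩ := hno k (by omega)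
      have hsub : ((satStep black)^[k] (PySem.Set.ofList [c])).toFinset ⊆
          ((satStep black)^[k + 1] (PySem.Set.ofList [c])).toFinset := by
        intro y hy
        rw [List.mem_toFinset] at hy ⊢
        exact sat_mono black c (Nat.le_succ k) y hy
      have hxin : x ∈ (satStep black)^[k + 1] (PySem.Set.ofList [c]) ∧
          x ∉ (satStep black)^[k] (PySem.Set.ofList [c]) := by
        rcases hxdiff with ⟨h1, h2⟩ | ⟨h1, h2⟩
        · exact ⟨h1, h2⟩
        · exact absurd (sat_mono black c (Nat.le_succ k) x h2) h1
      have hss : ((satStep black)^[k] (PySem.Set.ofList [c])).toFinset ⊂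
          ((satStep black)^[k + 1] (PySem.Set.ofList [c])).toFinset := by
        refine ⟨hsub, fun hrev => ?_⟩
        have := hrev (List.mem_toFinset.mpr hxin.1)
        rw [List.mem_toFinset] at this
        exact hxin.2 this
      have := Finset.card_lt_card hss
      have := ih (by omega)
      omega
  have hfin := hcard black.length le_rfl
  have hsubB : ((satStep black)^[black.length] (PySem.Set.ofList [c])).toFinset ⊆
      black.toFinset := by
    intro y hy
    rw [List.mem_toFinset] at hy ⊢
    exact (sat_sound black width height c Hb Hg hcb black.length y hy).2
  have h1 := Finset.card_le_card hsubB
  have h2 := List.toFinset_card_le black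
  omega

-- B's saturated set is exactly A's reachability relation
theorem satReach_mem (black : List (Int × Int)) (width height : Int) (c : Int × Int)
    (Hb : ∀ p ∈ black, isBorderCell p.1 p.2 width height = true)
    (Hg : ∀ p ∈ black, 0 ≤ p.1 ∧ p.1 < height ∧ 0 ≤ p.2 ∧ p.2 < width)
    (hcb : c ∈ black) (x : Int × Int) :
    x ∈ satReach black c ↔ Reach black width height c x := by
  unfold satReach
  rw [foldl_range_const]
  constructor
  · intro hx
    exact (sat_sound black width height c Hb Hg hcb black.length x hx).1
  · intro hr
    obtain ⟨k, hk, hfix⟩ := sat_exists_fix black width height c Hb Hg hcb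
    exact sat_mono black c (by omega) x (sat_fix_complete black width height c k hfix hr)

theorem validate_black_cells_spec : Claim_equal_validate_black_cells := by
  intro width height black_cells _ hpre
  unfold Spec_validate_black_cells
  simp only [validate_black_cells, validate_black_cells_alt,
    show isBorderCellB = isBorderCell from rfl]
  set black := PySem.Set.ofList black_cells with hblack
  by_cases h4 : PySem.Set.len black > 4
  · rw [if_pos h4, if_pos h4]
  · rw [if_neg h4, if_neg h4]
    by_cases hbord : (black.any fun rc => !isBorderCell rc.1 rc.2 width height) = true
    · rw [if_pos hbord, if_pos hbord]
    · rw [if_neg hbord, if_neg hbord]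
      have Hb : ∀ p ∈ black, isBorderCell p.1 p.2 width height = true := by
        intro p hp
        have := List.any_eq_false.mp (Bool.eq_false_iff.mpr hbord) p hp
        simpa using this
      have Hg : ∀ p ∈ black, 0 ≤ p.1 ∧ p.1 < height ∧ 0 ≤ p.2 ∧ p.2 < width := by
        rcases hpre with hpre | hpre | hpre
        · exact absurd hpre h4
        · obtain ⟨p, hpm, hpnb⟩ := hpre
          have := Hb p ((PySem.Set.mem_ofList black_cells p).mpr hpm)
          simp only [isBorderCell, Bool.or_eq_true, beq_iff_eq] at this
          exact absurd (by tauto : p.1 = 0 ∨ p.2 = 0 ∨ p.1 = height - 1 ∨ p.2 = width - 1) hpnb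
        · intro p hp
          exact hpre p ((PySem.Set.mem_ofList black_cells p).mp hp)
      by_cases hemp : black.isEmpty = true
      · rw [if_pos hemp]
        rw [List.isEmpty_iff.mp hemp]
        rfl
      · rw [if_neg hemp]
        rw [Bool.eq_iff_iff]
        rw [outerLoop_spec black width height Hb Hg black PySem.Set.empty (fun _ h => h)
          (fun x hx => absurd hx List.not_mem_nil)
          (fun x hx => absurd hx List.not_mem_nil)]
        rw [List.all_eq_true]
        constructor
        · intro hall cell hcm
          rw [List.any_eq_true]
          have hg : ∃ k ∈ validCornersB cell width height,
              k ∈ black ∧ Reach black width height cell k :=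
            hall cell hcm List.not_mem_nil cell .refl
          obtain ⟨k, hkv, _, hkr⟩ := hg
          exact ⟨k, hkv, (PySem.Set.contains_iff _ _).mpr
            ((satReach_mem black width height cell Hb Hg hcm k).mpr hkr)⟩
        · intro hall s hsm _ x hx
          have hxb : x ∈ black := reach_mem hsm hx
          have h1 := hall x hxb
          rw [List.any_eq_true] at h1
          obtain ⟨k, hkv, hkc⟩ := h1
          have hkr := (satReach_mem black width height x Hb Hg hxb k).mp
            ((PySem.Set.contains_iff _ _).mp hkc)
          exact ⟨k, hkv, reach_mem hxb hkr, hkr⟩
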